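-- pv_equiv track=rewrite | github.com/cauan-sampaio/ESTD | zerapar.py | zerarPar
-- ===== SOURCE A (Python) =====
-- def zerarPar(n):
--     if n < 10:
--         if n % 2:
--             return n
--         else:
--             return 0
--     else:
--         if (n % 10) % 2:
--             return n % 10 + 10 * zerarPar(n // 10)
--         else:
--             return 10 * zerarPar(n // 10)
-- ===== SOURCE B (Python) =====
-- def zerarPar(n):
--     if n < 10:
--         return n if n % 2 else 0
--     result, place = 0, 1
--     while n >= 10:
--         d = n % 10
--         if d % 2:
--             result += d * place
--         n //= 10
--         place *= 10
--     if n % 2: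
--         result += n * place
--     return result
-- ===== Notes on version B (the rewrite author's own statement) =====
-- stated objective: alternative
-- what changed: Replaced the recursive per-digit reconstruction with an iterative digit-peeling loop that accumulates odd digits times their place value.
import Mathlib
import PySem

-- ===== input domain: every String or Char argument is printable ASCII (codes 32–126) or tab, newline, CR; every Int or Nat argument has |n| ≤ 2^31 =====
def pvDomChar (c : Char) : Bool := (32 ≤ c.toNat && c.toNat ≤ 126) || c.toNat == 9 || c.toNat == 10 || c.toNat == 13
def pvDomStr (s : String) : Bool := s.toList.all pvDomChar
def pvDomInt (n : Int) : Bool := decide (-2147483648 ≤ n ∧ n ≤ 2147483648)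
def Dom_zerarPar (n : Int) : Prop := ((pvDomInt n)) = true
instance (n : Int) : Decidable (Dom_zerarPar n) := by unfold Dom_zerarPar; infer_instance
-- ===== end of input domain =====

-- B replaces A's recursive digit reconstruction by an iterative digit-peeling loop
-- accumulating odd digits times their place value (alternative decomposition, same cost).


-- ===== PORT A =====
-- A's recursion on n//10 is realised with a fuel counter (n.toNat + 1 always suffices);
-- each step is A's code verbatim.
def zerarParGo : Nat → Int → Int
  | 0, _ => 0
  | fuel + 1, n =>
    if n < 10 then
      if PySem.Int.mod n 2 ≠ 0 then n else 0
    else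
      if PySem.Int.mod (PySem.Int.mod n 10) 2 ≠ 0 then
        PySem.Int.mod n 10 + 10 * zerarParGo fuel (PySem.Int.floordiv n 10)
      else
        10 * zerarParGo fuel (PySem.Int.floordiv n 10)

def zerarPar (n : Int) : Int := zerarParGo (n.toNat + 1) n

-- ===== PORT B =====
-- B's while-loop, with the same fuel counter making it total.
def zerarLoopGo : Nat → Int → Int → Int → Int
  | 0, _, _, result => result
  | fuel + 1, n, place, result =>
    if n ≥ 10 then
      zerarLoopGo fuel (PySem.Int.floordiv n 10) (place * 10)
        (if PySem.Int.mod (PySem.Int.mod n 10) 2 ≠ 0 then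
          result + PySem.Int.mod n 10 * place
        else result)
    else
      if PySem.Int.mod n 2 ≠ 0 then result + n * place else result

def zerarPar_alt (n : Int) : Int :=
  if n < 10 then
    if PySem.Int.mod n 2 ≠ 0 then n else 0
  else
    zerarLoopGo (n.toNat + 1) n 1 0

-- ===== PRECONDITION & SPEC =====
def Spec_zerarPar (n : Int) (out : Int) : Prop := out = zerarPar_alt n
instance (n : Int) (out : Int) : Decidable (Spec_zerarPar n out) := by unfold Spec_zerarPar; infer_instance

-- ===== CLAIM (what is proved, stated in full; the proofs are below) =====
def Claim_equal_zerarPar : Prop := ∀ (n : Int), Dom_zerarPar n → Spec_zerarPar n (zerarPar n)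

-- ===== LEMMAS AND PROOFS =====
theorem zerarLoopGo_eq (fuel : Nat) :
    ∀ n place result : Int, n.toNat < fuel →
      zerarLoopGo fuel n place result = result + place * zerarParGo fuel n := by
  induction fuel with
  | zero => intro n place result hk; omega
  | succ fuel ih =>
    intro n place result hk
    simp only [zerarLoopGo, zerarParGo]
    by_cases h : n ≥ 10
    · have h' : ¬ n < 10 := by omega
      have hfd : (PySem.Int.floordiv n 10).toNat < fuel := by
        rw [PySem.Int.floordiv_eq_ediv_of_pos (by omega)]; omega
      rw [if_pos h, if_neg h', ih _ _ _ hfd]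
      by_cases hm : PySem.Int.mod (PySem.Int.mod n 10) 2 ≠ 0
      · rw [if_pos hm, if_pos hm]; ring
      · rw [if_neg hm, if_neg hm]; ring
    · have h' : n < 10 := by omega
      rw [if_neg h, if_pos h']
      by_cases hm : PySem.Int.mod n 2 ≠ 0
      · rw [if_pos hm, if_pos hm]; ring
      · rw [if_neg hm, if_neg hm]; ring

-- ===== VERDICT (by name: the statement is the Claim_ definition above) =====
theorem zerarPar_spec : Claim_equal_zerarPar := by
  intro n _
  unfold Spec_zerarPar zerarPar_alt zerarPar
  by_cases h : n < 10
  · rw [if_pos h]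
    simp only [zerarParGo]
    rw [if_pos h]
  · rw [if_neg h, zerarLoopGo_eq _ _ _ _ (by omega)]
    ring
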